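-- pv_equiv track=rewrite | github.com/pvyleta/xcc-integration | custom_components/xcc/descriptor_parser.py | _parse_visibility_condition
-- ===== SOURCE A (Python) =====
-- def _parse_visibility_condition(vis_data: str) -> list[tuple[str, str]]:
--     """Parse visData string into list of (property, expected_value) tuples.
--
--     Format: "count;property1;value1;property2;value2;..."
--     Example: "1;TUVSCHOVANITEPLOT;0" -> [("TUVSCHOVANITEPLOT", "0")]
--     """
--     if not vis_data:
--         return []
--
--     parts = vis_data.split(';')
--     if len(parts) < 1:
--         return []
--
--     try:
--         count = int(parts[0])
--         conditions = []
--
--         for i in range(count):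
--             prop_idx = 1 + (i * 2)
--             val_idx = 2 + (i * 2)
--
--             if prop_idx < len(parts) and val_idx < len(parts):
--                 conditions.append((parts[prop_idx], parts[val_idx]))
--
--         return conditions
--     except (ValueError, IndexError):
--         return []
-- ===== SOURCE B (Python) =====
-- def _parse_visibility_condition(vis_data: str) -> list[tuple[str, str]]:
--     """Parse visData string into list of (property, expected_value) tuples.
--
--     Format: "count;property1;value1;property2;value2;..."
--     """
--     if not vis_data:
--         return []
--     parts = vis_data.split(';')
--     try:
--         count = int(parts[0])
--     except ValueError:
--         return []
--     it = iter(parts[1:])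
--     return list(zip(it, it))[:max(count, 0)]
-- ===== Notes on version B (the rewrite author's own statement) =====
-- stated objective: idiomatic
-- what changed: Replaces the count-driven index loop (range(count) with per-iteration index arithmetic and bounds checks) by pairing the tail elements directly with the zip(it, it) idiom and truncating the pair list with a single slice [:max(count, 0)].
import Mathlib
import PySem

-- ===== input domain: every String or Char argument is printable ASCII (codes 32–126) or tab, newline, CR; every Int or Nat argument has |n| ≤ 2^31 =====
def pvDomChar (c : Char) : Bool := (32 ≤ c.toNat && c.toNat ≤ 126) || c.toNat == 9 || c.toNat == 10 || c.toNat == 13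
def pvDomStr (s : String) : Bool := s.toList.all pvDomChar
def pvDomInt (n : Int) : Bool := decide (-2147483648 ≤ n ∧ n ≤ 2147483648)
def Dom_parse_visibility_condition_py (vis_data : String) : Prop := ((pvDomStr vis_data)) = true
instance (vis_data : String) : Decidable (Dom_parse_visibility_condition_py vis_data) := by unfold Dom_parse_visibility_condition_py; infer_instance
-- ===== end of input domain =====

-- B replaces A's count-driven index loop by pairing the tail elements directly (zip(it, it))
-- and truncating with one slice [:max(count, 0)] — a more idiomatic decomposition, same result.

-- ===== PORT A =====
def parse_visibility_condition_py (vis_data : String) : List (String × String) :=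
  if vis_data = "" then []
  else
    let parts := (PySem.Str.split? vis_data ";").getD []   -- sep ";" ≠ "", so split? is `some` here
    if parts.length < 1 then []
    else
      match PySem.Int.ofStr? (PySem.List.pyGetD parts 0 "") with
      | none => []        -- int() raised ValueError → except returns []
      | some count =>
          (PySem.List.pyRange 0 count 1).foldl
            (fun conditions i =>
              let prop_idx : Int := 1 + i * 2
              let val_idx : Int := 2 + i * 2
              if prop_idx < PySem.List.len parts ∧ val_idx < PySem.List.len parts then
                conditions ++
                  [(PySem.List.pyGetD parts prop_idx "", PySem.List.pyGetD parts val_idx "")]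
              else conditions)
            []

-- ===== PORT B =====
-- zip(it, it) on one iterator pairs consecutive elements; ported exactly as two-step structural recursion
def pvPairUp {α : Type} : List α → List (α × α)
  | a :: b :: rest => (a, b) :: pvPairUp rest
  | _ => []

def parse_visibility_condition_py_alt (vis_data : String) : List (String × String) :=
  if vis_data = "" then []
  else
    let parts := (PySem.Str.split? vis_data ";").getD []   -- sep ";" ≠ "", so split? is `some` here
    match PySem.Int.ofStr? (PySem.List.pyGetD parts 0 "") with
    | none => []        -- int() raised ValueError → except returns []
    | some count =>
        PySem.List.slice (pvPairUp (PySem.List.slice parts (some 1) none)) none (some (max count 0))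

-- ===== PRECONDITION & SPEC =====
def Spec_parse_visibility_condition_py (vis_data : String) (out : List (String × String)) : Prop := out = parse_visibility_condition_py_alt vis_data
instance (vis_data : String) (out : List (String × String)) : Decidable (Spec_parse_visibility_condition_py vis_data out) := by unfold Spec_parse_visibility_condition_py; infer_instance

-- ===== CLAIM (what is proved, stated in full; the proofs are below) =====
def Claim_equal_parse_visibility_condition_py : Prop := ∀ (vis_data : String), Dom_parse_visibility_condition_py vis_data → Spec_parse_visibility_condition_py vis_data (parse_visibility_condition_py vis_data)

-- ===== LEMMAS AND PROOFS =====

theorem pvPairUp_getElem? {α : Type} (xs : List α) (n : Nat) :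
    (pvPairUp xs)[n]? =
      match xs[2 * n]?, xs[2 * n + 1]? with
      | some a, some b => some (a, b)
      | _, _ => none := by
  induction xs using pvPairUp.induct generalizing n with
  | case1 a b rest ih =>
      cases n with
      | zero => simp [pvPairUp]
      | succ m =>
          have h2 : 2 * (m + 1) = (2 * m) + 1 + 1 := by ring
          simp [pvPairUp, h2, ih m]
  | case2 xs h1 =>
      -- xs is [] or [a]: pvPairUp xs = [] and xs[2n+1]? = none
      match xs, h1 with
      | [], _ => simp [pvPairUp]
      | [a], _ =>
          have hn : ([a] : List α)[2 * n + 1]? = none := by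
            rw [List.getElem?_eq_none_iff]; simp
          rw [show pvPairUp ([a] : List α) = [] from rfl, hn]
          cases ([a] : List α)[2 * n]? <;> simp
      | a :: b :: rest, h => exact absurd rfl (fun hh => h a b rest hh)

theorem pvLoop_eq_take (parts : List String) (n : Nat) (acc : List (String × String)) :
    (PySem.List.pyRange 0 (n : Int) 1).foldl
        (fun conditions i =>
          let prop_idx : Int := 1 + i * 2
          let val_idx : Int := 2 + i * 2
          if prop_idx < PySem.List.len parts ∧ val_idx < PySem.List.len parts then
            conditions ++
              [(PySem.List.pyGetD parts prop_idx "", PySem.List.pyGetD parts val_idx "")]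
          else conditions)
        acc
      = acc ++ List.take n (pvPairUp (List.drop 1 parts)) := by
  induction n generalizing acc with
  | zero => simp [PySem.List.pyRange_one_eq_nil]
  | succ m ih =>
      have hcast : ((m + 1 : Nat) : Int) = (m : Int) + 1 := by push_cast; ring
      rw [hcast, PySem.List.pyRange_one_succ_right (by positivity), List.foldl_append, ih]
      simp only [List.foldl_cons, List.foldl_nil]
      have hget := pvPairUp_getElem? (List.drop 1 parts) m
      have e1 : 1 + 2 * m = 2 * m + 1 := by ring
      have e2 : 1 + (2 * m + 1) = 2 * m + 2 := by ring
      rw [List.getElem?_drop, List.getElem?_drop, e1, e2] at hget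
      simp only [PySem.List.len_eq]
      by_cases hc : (1 + (m : Int) * 2 < (parts.length : Int) ∧ 2 + (m : Int) * 2 < (parts.length : Int))
      · -- both indices in range: the loop appends the m-th pair
        have h1 : 2 * m + 1 < parts.length := by omega
        have h2 : 2 * m + 2 < parts.length := by omega
        have g1 : PySem.List.pyGetD parts (1 + (m : Int) * 2) "" = parts[2 * m + 1] := by
          have e : (1 + (m : Int) * 2) = ((2 * m + 1 : Nat) : Int) := by push_cast; ring
          rw [e, PySem.List.pyGetD_natCast]
          exact List.getD_eq_getElem parts "" h1
        have g2 : PySem.List.pyGetD parts (2 + (m : Int) * 2) "" = parts[2 * m + 2] := by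
          have e : (2 + (m : Int) * 2) = ((2 * m + 2 : Nat) : Int) := by push_cast; ring
          rw [e, PySem.List.pyGetD_natCast]
          exact List.getD_eq_getElem parts "" h2
        rw [if_pos hc, g1, g2, List.take_add_one, hget,
          List.getElem?_eq_getElem h1, List.getElem?_eq_getElem h2]
        simp [List.append_assoc]
      · -- out of range: nothing appended and the pair list has no m-th element
        have hnone : parts[2 * m + 2]? = none := by
          rw [List.getElem?_eq_none_iff]; omega
        have hm : (pvPairUp (List.drop 1 parts))[m]? = none := by
          rw [hget, hnone]; cases parts[2 * m + 1]? <;> rfl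
        rw [if_neg hc, List.take_add_one, hm]
        simp

-- ===== VERDICT (by name: the statement is the Claim_ definition above) =====
theorem parse_visibility_condition_py_spec : Claim_equal_parse_visibility_condition_py := by
  intro vis_data _
  unfold Spec_parse_visibility_condition_py
  unfold parse_visibility_condition_py parse_visibility_condition_py_alt
  by_cases he : vis_data = ""
  · simp [he]
  · simp only [he, if_false]
    generalize (PySem.Str.split? vis_data ";").getD [] = parts
    by_cases hlen : parts.length < 1
    · -- parts = [], so int(parts[0]) = int("") raises in B too
      have hnil : parts = [] := List.length_eq_zero_iff.mp (by omega)
      rw [hnil]; decide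
    · simp only [hlen, if_false]
      cases hof : PySem.Int.ofStr? (PySem.List.pyGetD parts 0 "") with
      | none => rfl
      | some count =>
          dsimp only
          by_cases hcnt : 0 ≤ count
          · have hcn : count = ((count.toNat : Nat) : Int) := by omega
            rw [hcn, pvLoop_eq_take parts count.toNat [],
              PySem.List.slice_from parts (by omega : (0:Int) ≤ 1),
              PySem.List.slice_to _ (by omega : (0:Int) ≤ max ((count.toNat : Nat) : Int) 0)]
            have hmax : (max ((count.toNat : Nat) : Int) 0).toNat = count.toNat := by omega
            rw [hmax]
            norm_num
          · have hr : PySem.List.pyRange 0 count 1 = [] :=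
              PySem.List.pyRange_one_eq_nil (by omega)
            have hmax : max count 0 = 0 := by omega
            rw [hr, hmax, PySem.List.slice_to _ (le_refl (0:Int))]
            simp
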